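-- pv_equiv track=rewrite | github.com/vicwomg/pikaraoke | pikaraoke/lib/lyrics_align.py | _group_chars_by_word
-- ===== SOURCE A (Python) =====
-- def _group_chars_by_word(seg_chars: list[dict]) -> list[list[dict]]:
--     """Split whisperx's flat char list into per-word char groups.
--
--     Space characters are delimiters - they appear in the char list even
--     though they carry no timings. We start a new group whenever a space
--     is seen; leading spaces produce empty-group prefixes which we drop
--     to stay aligned with the word list (which has no leading-space
--     placeholder).
--     """
--     groups: list[list[dict]] = [[]]
--     for entry in seg_chars:
--         if not isinstance(entry, dict):
--             continue
--         ch = entry.get("char", "")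
--         if ch == " ":
--             if groups[-1]:  # only start a new group after non-empty content
--                 groups.append([])
--             continue
--         groups[-1].append(entry)
--     if groups and not groups[-1]:
--         groups.pop()
--     return groups
-- ===== SOURCE B (Python) =====
-- def _group_chars_by_word(seg_chars: list[dict]) -> list[list[dict]]:
--     """Two-pointer run scanner: slice out each maximal run of non-space
--     dict entries directly, so no empty-group sentinel or trailing pop is
--     needed."""
--     entries = [e for e in seg_chars if isinstance(e, dict)]
--     out = []
--     i = 0
--     n = len(entries)
--     while i < n:
--         if entries[i].get("char", "") == " ":
--             i += 1
--             continue
--         j = i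
--         while j < n and entries[j].get("char", "") != " ":
--             j += 1
--         out.append(entries[i:j])
--         i = j
--     return out
-- ===== Notes on version B (the rewrite author's own statement) =====
-- stated objective: alternative
-- what changed: Replaces A's mutable groups-list with an empty-group sentinel and trailing pop by a two-pointer scan that slices each maximal non-space run out of the (dict-filtered) stream directly.
import Mathlib
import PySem

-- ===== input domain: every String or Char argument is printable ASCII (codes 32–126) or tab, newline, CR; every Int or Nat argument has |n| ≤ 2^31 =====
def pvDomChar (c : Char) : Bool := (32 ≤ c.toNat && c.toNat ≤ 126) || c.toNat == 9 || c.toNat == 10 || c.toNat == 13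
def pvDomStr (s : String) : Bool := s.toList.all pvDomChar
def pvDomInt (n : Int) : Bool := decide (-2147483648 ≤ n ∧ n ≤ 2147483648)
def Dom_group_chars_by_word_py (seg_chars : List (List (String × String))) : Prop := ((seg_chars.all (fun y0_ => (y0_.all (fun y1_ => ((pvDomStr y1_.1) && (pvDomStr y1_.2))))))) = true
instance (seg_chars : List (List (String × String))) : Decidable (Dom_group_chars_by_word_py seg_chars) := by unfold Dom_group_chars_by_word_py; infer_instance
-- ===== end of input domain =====

-- B replaces A's sentinel-group mutation and trailing pop by a run-splitting scan; objective: alternative (same cost).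

-- entry.get("char", "") — the dict-lookup primitive both Pythons use
def pvGetChar (e : List (String × String)) : String := (PySem.Dict.mk e).getD "char" ""

-- ===== PORT A =====
-- Under the type convention every entry is a dict, so A's `isinstance(entry, dict)` test is
-- always true and its `continue` branch is unreachable; it is omitted.
-- One loop iteration of A over the mutable `groups` (ch := entry.get("char", "") is inlined).
def pvAStep (groups : List (List (List (String × String)))) (entry : List (String × String)) :
    List (List (List (String × String))) :=
  if pvGetChar entry = " " then
    (if groups.getLastD [] ≠ [] then groups ++ [[]] else groups)   -- start new group after content
  else
    groups.dropLast ++ [groups.getLastD [] ++ [entry]]             -- groups[-1].append(entry)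

def group_chars_by_word_py (seg_chars : List (List (String × String))) :
    List (List (List (String × String))) :=
  let groups := seg_chars.foldl pvAStep [[]]
  if groups ≠ [] ∧ groups.getLastD [] = [] then groups.dropLast else groups  -- trailing pop

-- ===== PORT B =====
def pvIsSpace (e : List (String × String)) : Bool := pvGetChar e == " "

-- B's while loop over the remaining suffix: skip a space, else slice out the maximal
-- non-space run (the inner j-advance = takeWhile/dropWhile) and continue after it.
def pvRuns : List (List (String × String)) → List (List (List (String × String)))
  | [] => []
  | e :: rest =>
    if pvIsSpace e then pvRuns rest
    else (e :: rest.takeWhile (fun x => !pvIsSpace x)) :: pvRuns (rest.dropWhile (fun x => !pvIsSpace x))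
termination_by xs => xs.length
decreasing_by
  · simp
  · have := List.length_dropWhile_le (p := fun x => !pvIsSpace x) (l := rest)
    simp only [List.length_cons]
    omega

-- Under the type convention every entry is a dict, so B's filter keeps everything; it is omitted.
def group_chars_by_word_py_alt (seg_chars : List (List (String × String))) :
    List (List (List (String × String))) :=
  pvRuns seg_chars

-- ===== PRECONDITION & SPEC =====
def Spec_group_chars_by_word_py (seg_chars : List (List (String × String))) (out : List (List (List (String × String)))) : Prop := out = group_chars_by_word_py_alt seg_chars
instance (seg_chars : List (List (String × String))) (out : List (List (List (String × String)))) : Decidable (Spec_group_chars_by_word_py seg_chars out) := by unfold Spec_group_chars_by_word_py; infer_instance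

-- ===== CLAIM (what is proved, stated in full; the proofs are below) =====
def Claim_equal_group_chars_by_word_py : Prop := ∀ (seg_chars : List (List (String × String))), Dom_group_chars_by_word_py seg_chars → Spec_group_chars_by_word_py seg_chars (group_chars_by_word_py seg_chars)

-- ===== LEMMAS AND PROOFS =====

-- A's final "pop the empty trailing group" step, as a function.
def pvFin (gs : List (List (List (String × String)))) : List (List (List (String × String))) :=
  if gs ≠ [] ∧ gs.getLastD [] = [] then gs.dropLast else gs

theorem pvGetLastD_default {α : Type} (b : List α) (h : b ≠ []) (d d' : α) :
    b.getLastD d = b.getLastD d' := by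
  cases b with
  | nil => exact absurd rfl h
  | cons x xs => rfl

theorem pvGetLastD_append {α : Type} (a b : List α) (h : b ≠ []) (d : α) :
    (a ++ b).getLastD d = b.getLastD d := by
  induction a generalizing d with
  | nil => rfl
  | cons x xs ih =>
    rw [List.cons_append, List.getLastD_cons]
    exact (ih x).trans (pvGetLastD_default b h x d)

theorem pvAStep_ne_nil (gs : List (List (List (String × String)))) (x : List (String × String))
    (h : gs ≠ []) : pvAStep gs x ≠ [] := by
  unfold pvAStep
  split
  · split <;> simp [h]
  · simp

theorem pvFoldl_ne_nil (xs : List (List (String × String)))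
    (gs : List (List (List (String × String)))) (h : gs ≠ []) :
    xs.foldl pvAStep gs ≠ [] := by
  induction xs generalizing gs with
  | nil => exact h
  | cons x xs ih => exact ih _ (pvAStep_ne_nil gs x h)

theorem pvAStep_factor (done gs : List (List (List (String × String)))) (x : List (String × String))
    (h : gs ≠ []) : pvAStep (done ++ gs) x = done ++ pvAStep gs x := by
  unfold pvAStep
  rw [pvGetLastD_append done gs h, List.dropLast_append_of_ne_nil h]
  split
  · split <;> simp
  · simp

theorem pvFoldl_factor (xs : List (List (String × String)))
    (done gs : List (List (List (String × String)))) (h : gs ≠ []) :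
    xs.foldl pvAStep (done ++ gs) = done ++ xs.foldl pvAStep gs := by
  induction xs generalizing gs with
  | nil => rfl
  | cons x xs ih =>
    simp only [List.foldl_cons, pvAStep_factor done gs x h]
    exact ih _ (pvAStep_ne_nil gs x h)

theorem pvFin_factor (done gs : List (List (List (String × String)))) (h : gs ≠ []) :
    pvFin (done ++ gs) = done ++ pvFin gs := by
  unfold pvFin
  rw [pvGetLastD_append done gs h, List.dropLast_append_of_ne_nil h]
  have hne : done ++ gs ≠ [] := by simp [h]
  split <;> split <;> simp_all

-- Main invariant: folding A's step starting from a single current group `cur`, then popping,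
-- yields B's run decomposition (with `cur` glued onto the first run if nonempty).
theorem pvMain (xs : List (List (String × String))) (cur : List (List (String × String))) :
    pvFin (xs.foldl pvAStep [cur]) =
      if cur = [] then pvRuns xs
      else (cur ++ xs.takeWhile (fun x => !pvIsSpace x)) ::
             pvRuns (xs.dropWhile (fun x => !pvIsSpace x)) := by
  induction xs generalizing cur with
  | nil =>
    by_cases h : cur = [] <;> simp [pvFin, pvRuns, h]
  | cons x xs ih =>
    by_cases hx : pvIsSpace x
    · have hch : pvGetChar x = " " := by simpa [pvIsSpace] using hx
      by_cases h : cur = []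
      · have hstep : pvAStep [cur] x = [cur] := by simp [pvAStep, hch, h]
        rw [List.foldl_cons, hstep, ih]
        simp [h, pvRuns, hx]
      · have hstep : pvAStep [cur] x = [cur] ++ [[]] := by simp [pvAStep, hch, h]
        rw [List.foldl_cons, hstep, pvFoldl_factor _ _ _ (by simp),
            pvFin_factor _ _ (pvFoldl_ne_nil _ _ (by simp))]
        simp [ih, h, pvRuns, hx]
    · have hch : ¬ pvGetChar x = " " := by simpa [pvIsSpace] using hx
      have hstep : pvAStep [cur] x = [cur ++ [x]] := by simp [pvAStep, hch]
      rw [List.foldl_cons, hstep, ih]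
      by_cases h : cur = [] <;>
        simp [h, pvRuns, hx]

-- ===== VERDICT (by name: the statement is the Claim_ definition above) =====
theorem group_chars_by_word_py_spec : Claim_equal_group_chars_by_word_py := by
  intro seg_chars _
  show group_chars_by_word_py seg_chars = group_chars_by_word_py_alt seg_chars
  have h := pvMain seg_chars []
  simpa [pvFin, group_chars_by_word_py, group_chars_by_word_py_alt] using h
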